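-- pv_equiv track=rewrite | github.com/nadiamason/Sudoku-Solver | sudokusolver.py | solving_iteration
-- ===== SOURCE A (Python) =====
-- def divide_chunks(l, n):
--
--     # looping till length l
--     for i in range(0, len(l), n):
--         yield l[i:i + n]
--
-- def make_columns_boxes(grid):
--     columns = []
--
--     for i in range(9):
--         columns.append([item[i] for item in grid])
--
--     # list should have
--     n = 3
--     boxes = []
--     final_boxes = []
--     for row in grid:
--
--         x = list(divide_chunks(row, n))
--         boxes.append(x)
--
--
--     for i in range(3):
--         f_boxes = []
--
--         for y in boxes:
--             f_boxes.append(y[i])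
--
--         final_boxes.append(f_boxes)
--
--     the_boxes = []
--     for box in final_boxes:
--         z = list(divide_chunks(box, n))
--         for i in range(0,3):
--             z[i] = [x for l in z[i] for x in l]
--             the_boxes.append(z[i])
--
--     return the_boxes, columns
--
-- def solving_iteration(grid):
--     rownumber = 0
--
--     for row in grid:
--
--         columnnumber = 0
--         for x in row:
--
--             if x == 0:
--
--                 if rownumber <= 2:
--                     boxnumber = 0
--                 elif rownumber >= 6:
--                     boxnumber = 2
--                 else:
--                     boxnumber = 1
--
--                 if columnnumber > 2 and columnnumber < 6 and boxnumber == 0: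
--                     boxnumber = 3
--                 elif columnnumber > 2 and columnnumber < 6 and boxnumber == 1:
--                     boxnumber = 4
--                 elif columnnumber > 2 and columnnumber < 6 and boxnumber == 2:
--                     boxnumber = 5
--                 elif columnnumber >= 6 and boxnumber == 0:
--                     boxnumber = 6
--                 elif columnnumber >= 6 and boxnumber == 1:
--                     boxnumber = 7
--                 elif columnnumber >= 6 and boxnumber == 2:
--                     boxnumber = 8
--
--                 the_boxes, columns = make_columns_boxes(grid)
--
--                 value = [1, 2, 3, 4, 5, 6, 7, 8, 9]
--
--                 for n in set(grid[rownumber]):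
--                     try:
--                         value.remove(n)
--                     except ValueError:
--                         continue
--
--                 for n in set(columns[columnnumber]):
--                     try:
--                         value.remove(n)
--                     except ValueError:
--                         continue
--
--                 for n in set(the_boxes[boxnumber]):
--                     try:
--                         value.remove(n)
--                     except ValueError:
--                         continue
--
--                 if len(value) == 1:
--                     grid[rownumber][columnnumber] = value[0]
--
--             columnnumber += 1
--
--         rownumber += 1
--
--     return grid
-- ===== SOURCE B (Python) =====
-- def solving_iteration(grid):
--     for r in range(len(grid)):
--         row = grid[r]
--         for c in range(len(row)):
--             if row[c] == 0:
--                 forbidden = set(row)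
--                 forbidden.update(grid[i][c] for i in range(9))
--                 br, bc = 3 * (r // 3), 3 * (c // 3)
--                 for i in range(br, br + 3):
--                     forbidden.update(grid[i][bc:bc + 3])
--                 candidates = [v for v in range(1, 10) if v not in forbidden]
--                 if len(candidates) == 1:
--                     row[c] = candidates[0]
--     return grid
-- ===== Notes on version B (the rewrite author's own statement) =====
-- stated objective: faster
-- what changed: Per zero cell, A rebuilds every column and all nine 3x3 boxes of the whole grid (make_columns_boxes with generator chunking) and picks the box through a nine-branch if-chain, then removes forbidden digits from a candidate list with try/except; B reads only the cell's own row, column and block (located directly by r//3 and c//3) into one forbidden set and filters 1..9 against it, keeping the same in-place row-major fill order.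
import Mathlib
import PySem

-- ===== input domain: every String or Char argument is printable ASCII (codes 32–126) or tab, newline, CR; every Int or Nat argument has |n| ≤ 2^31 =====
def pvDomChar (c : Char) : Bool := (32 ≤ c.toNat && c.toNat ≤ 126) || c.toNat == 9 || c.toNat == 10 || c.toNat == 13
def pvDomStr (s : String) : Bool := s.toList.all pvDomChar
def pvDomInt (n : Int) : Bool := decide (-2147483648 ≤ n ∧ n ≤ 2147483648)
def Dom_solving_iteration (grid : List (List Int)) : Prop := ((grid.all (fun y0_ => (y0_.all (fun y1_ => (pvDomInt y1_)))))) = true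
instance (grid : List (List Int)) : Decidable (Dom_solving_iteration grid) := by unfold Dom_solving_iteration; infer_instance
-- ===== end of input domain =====

-- B replaces A's per-cell rebuild of all columns and boxes (make_columns_boxes) and the
-- boxnumber if-chain by reading only the needed row, column and 3x3 block directly from
-- r/3 and c/3 (objective: faster by a constant factor per zero cell; same in-place fill order,
-- equivalence is about the returned value; both Pythons mutate the argument identically).

-- ===== PORT A =====
-- divide_chunks(l, n): generator of slices l[i:i+n]
def divideChunksA {α : Type} (l : List α) (n : Int) : List (List α) :=
  (PySem.List.pyRange 0 (l.length : Int) n).map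
    (fun i => PySem.List.slice l (some i) (some (i + n)))

-- make_columns_boxes(grid); item[i] / y[i] / z[i] are in range on Pre_ (9×9), ported as pyGetD with default
def makeColumnsBoxesA (grid : List (List Int)) : List (List Int) × List (List Int) :=
  let columns : List (List Int) :=
    (PySem.List.pyRange 0 9 1).map (fun i => grid.map (fun item => PySem.List.pyGetD item i 0))
  let boxes : List (List (List Int)) := grid.map (fun row => divideChunksA row 3)
  let final_boxes : List (List (List Int)) :=
    (PySem.List.pyRange 0 3 1).map (fun i => boxes.map (fun y => PySem.List.pyGetD y i []))
  let the_boxes : List (List Int) :=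
    final_boxes.foldl (fun acc box =>
      let z := divideChunksA box 3
      (PySem.List.pyRange 0 3 1).foldl (fun acc2 i =>
        acc2 ++ [(PySem.List.pyGetD z i []).flatMap id]) acc) []
  (the_boxes, columns)

-- the boxnumber if-chain of A
def boxnumberA (rownumber columnnumber : Nat) : Nat :=
  let b := if rownumber ≤ 2 then 0 else if rownumber ≥ 6 then 2 else 1
  if columnnumber > 2 ∧ columnnumber < 6 ∧ b = 0 then 3
  else if columnnumber > 2 ∧ columnnumber < 6 ∧ b = 1 then 4
  else if columnnumber > 2 ∧ columnnumber < 6 ∧ b = 2 then 5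
  else if columnnumber ≥ 6 ∧ b = 0 then 6
  else if columnnumber ≥ 6 ∧ b = 1 then 7
  else if columnnumber ≥ 6 ∧ b = 2 then 8
  else b

-- "for n in set(...): try: value.remove(n) except ValueError: continue"
-- (the final list does not depend on the set's iteration order: each distinct n is removed at most once)
def removeLoopA (value : List Int) (s : List Int) : List Int :=
  s.foldl (fun v n => match PySem.List.remove? v n with | some v' => v' | none => v) value

-- the body under "if x == 0"; indexing grid[rownumber] / columns[...] / the_boxes[...] in range on Pre_
def solveCellA (g : List (List Int)) (r c : Nat) : List (List Int) :=
  let bn := boxnumberA r c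
  let tb := makeColumnsBoxesA g
  let value : List Int := [1, 2, 3, 4, 5, 6, 7, 8, 9]
  let value := removeLoopA value (PySem.Set.ofList (g.getD r []))
  let value := removeLoopA value (PySem.Set.ofList (tb.2.getD c []))
  let value := removeLoopA value (PySem.Set.ofList (tb.1.getD bn []))
  if value.length = 1 then g.set r ((g.getD r []).set c (value.getD 0 0)) else g

def solving_iteration (grid : List (List Int)) : List (List Int) :=
  (List.range grid.length).foldl (fun g r =>
    (List.range (g.getD r []).length).foldl (fun g2 c =>
      if (g2.getD r []).getD c 0 = 0 then solveCellA g2 r c else g2) g) grid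

-- ===== PORT B =====
-- forbidden = set(row) ∪ {grid[i][c]} ∪ the three slices grid[br+i][bc:bc+3]
def forbiddenB (g : List (List Int)) (r c : Nat) : PySem.Set Int :=
  let s := PySem.Set.ofList (g.getD r [])
  let s := PySem.Set.update s ((List.range 9).map (fun i => (g.getD i []).getD c 0))
  let br := 3 * (r / 3)
  let bc := 3 * (c / 3)
  (List.range 3).foldl (fun t i =>
    PySem.Set.update t
      (PySem.List.slice (g.getD (br + i) []) (some (bc : Int)) (some ((bc : Int) + 3)))) s

def solveCellB (g : List (List Int)) (r c : Nat) : List (List Int) :=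
  let forb := forbiddenB g r c
  let cands := (PySem.List.pyRange 1 10 1).filter (fun v => !(PySem.Set.contains forb v))
  if cands.length = 1 then g.set r ((g.getD r []).set c (cands.getD 0 0)) else g

def solving_iteration_alt (grid : List (List Int)) : List (List Int) :=
  (List.range grid.length).foldl (fun g r =>
    (List.range (g.getD r []).length).foldl (fun g2 c =>
      if (g2.getD r []).getD c 0 = 0 then solveCellB g2 r c else g2) g) grid

-- ===== PRECONDITION & SPEC =====
-- Pre_ is the natural Sudoku domain — a 9×9 grid — plus every grid without a 0 cell (both
-- programs return such a grid unchanged). Excluded are only non-9×9 grids containing a 0: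
-- there A usually raises IndexError inside make_columns_boxes, and where it still returns
-- (e.g. ≥ 7 rows, every row ≥ 9 long) its value hangs on the accidental chunking of the
-- oversized grid (columns read all rows, boxes only rows 0–8), which B does not reproduce
-- (B itself raises IndexError on grids with fewer than 9 rows there).
def Pre_solving_iteration (grid : List (List Int)) : Prop :=
  (grid.length = 9 ∧ ∀ row ∈ grid, row.length = 9) ∨ (∀ row ∈ grid, ∀ x ∈ row, x ≠ 0)
instance (grid : List (List Int)) : Decidable (Pre_solving_iteration grid) := by
  unfold Pre_solving_iteration; infer_instance

def pvWitness_solving_iteration : List (List Int) :=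
  [[5, 3, 0, 0, 7, 0, 0, 0, 0],
   [6, 0, 0, 1, 9, 5, 0, 0, 0],
   [0, 9, 8, 0, 0, 0, 0, 6, 0],
   [8, 0, 0, 0, 6, 0, 0, 0, 3],
   [4, 0, 0, 8, 0, 3, 0, 0, 1],
   [7, 0, 0, 0, 2, 0, 0, 0, 6],
   [0, 6, 0, 0, 0, 0, 2, 8, 0],
   [0, 0, 0, 4, 1, 9, 0, 0, 5],
   [0, 0, 0, 0, 8, 0, 0, 7, 9]]

def Spec_solving_iteration (grid : List (List Int)) (out : List (List Int)) : Prop :=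
  out = solving_iteration_alt grid
instance (grid : List (List Int)) (out : List (List Int)) : Decidable (Spec_solving_iteration grid out) := by
  unfold Spec_solving_iteration; infer_instance

-- ===== CLAIM (what is proved, stated in full; the proofs are below) =====
def Claim_equal_solving_iteration : Prop := ∀ (grid : List (List Int)), Dom_solving_iteration grid → Pre_solving_iteration grid → Spec_solving_iteration grid (solving_iteration grid)


-- ===== LEMMAS AND PROOFS =====

-- the try/except body of A's remove loop is List.erase
theorem removeStep (v : List Int) (n : Int) :
    (match PySem.List.remove? v n with | some v' => v' | none => v) = v.erase n := by
  by_cases h : n ∈ v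
  · rw [PySem.List.remove?_eq_some_erase v n h]
  · rw [(PySem.List.remove?_eq_none_iff v n).mpr h, List.erase_of_not_mem h]

-- on a duplicate-free list, removing every element of s once is a filter
theorem removeLoop_eq_filter : ∀ (s value : List Int), value.Nodup →
    removeLoopA value s = value.filter (fun v => decide (v ∉ s)) := by
  intro s
  induction s with
  | nil => intro value h; simp [removeLoopA]
  | cons n s' ih =>
      intro value h
      have hstep : removeLoopA value (n :: s') = removeLoopA (value.erase n) s' := by
        simp [removeLoopA, List.foldl_cons, removeStep]
      rw [hstep, ih _ (h.erase n), h.erase_eq_filter, List.filter_filter]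
      apply List.filter_congr
      intro v _
      simp only [List.mem_cons, not_or]
      cases hd : decide (v = n) <;> cases he : decide (v ∈ s') <;> simp_all [bne]

theorem removeLoop_ofList (T value : List Int) (h : value.Nodup) :
    removeLoopA value (PySem.Set.ofList T) = value.filter (fun v => decide (v ∉ T)) := by
  rw [removeLoop_eq_filter _ _ h]
  apply List.filter_congr
  intro v _
  simp [PySem.Set.mem_ofList]

-- A's boxnumber if-chain is the block index 3*(c/3) + r/3
theorem boxnumberA_eq : ∀ r < 9, ∀ c < 9, boxnumberA r c = 3 * (c / 3) + r / 3 := by decide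

theorem len9 {α : Type} (l : List α) (h : l.length = 9) :
    ∃ a b c d e f g h' i, l = [a, b, c, d, e, f, g, h', i] := by
  match l, h with
  | [a, b, c, d, e, f, g, h', i], _ => exact ⟨a, b, c, d, e, f, g, h', i, rfl⟩

theorem pr93 : PySem.List.pyRange 0 9 3 = [0, 3, 6] := by decide
theorem pr31 : PySem.List.pyRange 0 3 1 = [0, 1, 2] := by decide
theorem pr110 : PySem.List.pyRange 1 10 1 = [1, 2, 3, 4, 5, 6, 7, 8, 9] := by decide

-- A's columns[c] is the c-th column, read the way B reads it
theorem columns_getD (g : List (List Int)) (h9 : g.length = 9) (c : Nat) (hc : c < 9) :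
    (makeColumnsBoxesA g).2.getD c [] = (List.range 9).map (fun i => (g.getD i []).getD c 0) := by
  obtain ⟨g0, g1, g2, g3, g4, g5, g6, g7, g8, rfl⟩ := len9 g h9
  interval_cases c <;> simp [makeColumnsBoxesA, List.range_succ, PySem.List.pyGetD_ofNat', List.getD]

theorem sliceT3 (xs : List (List Int)) : PySem.List.slice xs none (some 3) = xs.take 3 := by
  exact_mod_cast PySem.List.slice_to_natCast xs 3
theorem slice36 (xs : List (List Int)) : PySem.List.slice xs (some 3) (some 6) = (xs.drop 3).take 3 := by
  exact_mod_cast PySem.List.slice_natCast xs 3 6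
theorem slice69 (xs : List (List Int)) : PySem.List.slice xs (some 6) (some 9) = (xs.drop 6).take 3 := by
  exact_mod_cast PySem.List.slice_natCast xs 6 9

-- A's the_boxes[3*cb+rb] is the (rb,cb) block: the three row slices B takes
theorem boxes_getD (g : List (List Int)) (h9 : g.length = 9)
    (hrows : ∀ row ∈ g, row.length = 9) (rb cb : Nat) (hrb : rb < 3) (hcb : cb < 3) :
    (makeColumnsBoxesA g).1.getD (3 * cb + rb) [] =
      PySem.List.slice (g.getD (3 * rb) []) (some ((3 * cb : Nat) : Int)) (some (((3 * cb : Nat) : Int) + 3)) ++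
      PySem.List.slice (g.getD (3 * rb + 1) []) (some ((3 * cb : Nat) : Int)) (some (((3 * cb : Nat) : Int) + 3)) ++
      PySem.List.slice (g.getD (3 * rb + 2) []) (some ((3 * cb : Nat) : Int)) (some (((3 * cb : Nat) : Int) + 3)) := by
  obtain ⟨g0, g1, g2, g3, g4, g5, g6, g7, g8, rfl⟩ := len9 g h9
  have h0 := hrows g0 (by simp); have h1 := hrows g1 (by simp)
  have h2 := hrows g2 (by simp); have h3 := hrows g3 (by simp)
  have h4 := hrows g4 (by simp); have h5 := hrows g5 (by simp)
  have h6 := hrows g6 (by simp); have h7 := hrows g7 (by simp)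
  have h8 := hrows g8 (by simp)
  interval_cases rb <;> interval_cases cb <;>
    simp [makeColumnsBoxesA, divideChunksA, pr93, pr31, h0, h1, h2, h3, h4, h5, h6, h7, h8,
      PySem.List.pyGetD_ofNat', List.getD]  <;>
    simp [sliceT3, slice36, slice69, List.flatten]

theorem if_set_congr (g : List (List Int)) (r c : Nat) {L1 L2 : List Int} (h : L1 = L2) :
    (if L1.length = 1 then g.set r ((g.getD r []).set c (L1.getD 0 0)) else g) =
    (if L2.length = 1 then g.set r ((g.getD r []).set c (L2.getD 0 0)) else g) := by rw [h]

-- on a 9x9 grid the two per-cell bodies agree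
theorem cell_eq (g : List (List Int)) (h9 : g.length = 9)
    (hrows : ∀ row ∈ g, row.length = 9) (r c : Nat) (hr : r < 9) (hc : c < 9) :
    solveCellA g r c = solveCellB g r c := by
  have hnod : ([1, 2, 3, 4, 5, 6, 7, 8, 9] : List Int).Nodup := by decide
  simp only [solveCellA, solveCellB]
  rw [removeLoop_ofList _ _ hnod, removeLoop_ofList _ _ (hnod.filter _),
      removeLoop_ofList _ _ ((hnod.filter _).filter _)]
  rw [List.filter_filter, List.filter_filter]
  rw [boxnumberA_eq r hr c hc, columns_getD g h9 c hc,
      boxes_getD g h9 hrows (r / 3) (c / 3) (by omega) (by omega), pr110]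
  apply if_set_congr
  apply List.filter_congr
  intro v hv
  simp only [forbiddenB, List.range_succ, List.range_zero]
  simp [PySem.Set.mem_update, PySem.Set.mem_ofList, List.mem_append, not_or]
  rw [Bool.eq_iff_iff]
  simp only [Bool.and_eq_true, Bool.not_eq_true', decide_eq_false_iff_not]
  tauto

-- the 9x9 shape, the invariant of both loops
def Shape9 (g : List (List Int)) : Prop := g.length = 9 ∧ ∀ row ∈ g, row.length = 9

-- writing one in-range cell keeps the 9x9 shape
theorem shape_set (g : List (List Int)) (r c : Nat) (x : Int)
    (h : Shape9 g) (hr : r < 9) :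
    Shape9 (g.set r ((g.getD r []).set c x)) := by
  obtain ⟨h9, hrows⟩ := h
  have hmem : g.getD r [] ∈ g := by
    rw [List.getD_eq_getElem g [] (by omega)]
    exact List.getElem_mem _
  refine ⟨by simp [h9], ?_⟩
  intro row hrow
  rcases List.mem_or_eq_of_mem_set hrow with h' | h'
  · exact hrows row h'
  · rw [h', List.length_set]; exact hrows _ hmem

theorem cellA_shape (g : List (List Int)) (r c : Nat)
    (h : Shape9 g) (hr : r < 9) :
    Shape9 (solveCellA g r c) := by
  simp only [solveCellA]
  split
  · exact shape_set g r c _ h hr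
  · exact h

-- fold two step functions that agree on and preserve an invariant
theorem foldl_congr_inv {α β : Type} (P : α → Prop) (f h : α → β → α) :
    ∀ (l : List β) (a : α), P a →
    (∀ a' b, P a' → b ∈ l → f a' b = h a' b ∧ P (f a' b)) →
    l.foldl f a = l.foldl h a ∧ P (l.foldl f a) := by
  intro l
  induction l with
  | nil => exact fun a ha _ => ⟨rfl, ha⟩
  | cons b t ih =>
      intro a ha H
      have h1 := H a b ha (by simp)
      have h2 := ih (f a b) h1.2 (fun a' b' ha' hb' => H a' b' ha' (by simp [hb']))
      simp only [List.foldl_cons]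
      rw [← h1.1]
      exact h2

-- a grid without a 0 cell passes through either nested loop unchanged
theorem noZeroFold (cell : List (List Int) → Nat → Nat → List (List Int))
    (g : List (List Int)) (h : ∀ row ∈ g, ∀ x ∈ row, x ≠ 0) :
    (List.range g.length).foldl (fun gg r =>
      (List.range (gg.getD r []).length).foldl (fun g2 c =>
        if (g2.getD r []).getD c 0 = 0 then cell g2 r c else g2) gg) g = g := by
  have hstep : ∀ (r : Nat) (l : List Nat), (∀ c ∈ l, c < (g.getD r []).length) →
      l.foldl (fun g2 c => if (g2.getD r []).getD c 0 = 0 then cell g2 r c else g2) g = g := by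
    intro r l
    induction l with
    | nil => intro _; rfl
    | cons c t ih =>
        intro hl
        have hc : c < (g.getD r []).length := hl c (by simp)
        have hrlen : r < g.length := by
          by_contra hr
          rw [List.getD_eq_default g [] (by omega)] at hc
          simp at hc
        have hne : (g.getD r []).getD c 0 ≠ 0 := by
          rw [List.getD_eq_getElem g [] hrlen] at hc ⊢
          rw [List.getD_eq_getElem _ 0 hc]
          exact h _ (List.getElem_mem _) _ (List.getElem_mem _)
        simp only [List.foldl_cons, if_neg hne]
        exact ih (fun c' hc' => hl c' (by simp [hc']))
  have houter : ∀ (l : List Nat), l.foldl (fun gg r =>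
      (List.range (gg.getD r []).length).foldl (fun g2 c =>
        if (g2.getD r []).getD c 0 = 0 then cell g2 r c else g2) gg) g = g := by
    intro l
    induction l with
    | nil => rfl
    | cons r t ih =>
        simp only [List.foldl_cons]
        rw [hstep r _ (fun c hc => List.mem_range.mp hc)]
        exact ih
  exact houter _

-- ===== VERDICT (by name: the statement is the Claim_ definition above) =====
theorem solving_iteration_spec : Claim_equal_solving_iteration := by
  intro grid _ hpre
  unfold Spec_solving_iteration solving_iteration solving_iteration_alt
  rcases hpre with hpre | hz
  case inr =>
    rw [noZeroFold solveCellA grid hz, noZeroFold solveCellB grid hz]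
  refine (foldl_congr_inv Shape9 _ _ (List.range grid.length) grid hpre ?_).1
  intro g r hg hr
  rw [List.mem_range, hpre.1] at hr
  refine foldl_congr_inv Shape9 _ _ (List.range (g.getD r []).length) g hg ?_
  intro g2 c hg2 hc
  rw [List.mem_range] at hc
  have hrow9 : (g.getD r []).length = 9 := by
    have hmem : g.getD r [] ∈ g := by
      have h9' := hg.1
      rw [List.getD_eq_getElem g [] (by omega)]
      exact List.getElem_mem _
    exact hg.2 _ hmem
  have hc9 : c < 9 := by omega
  by_cases hz : (g2.getD r []).getD c 0 = 0
  · rw [if_pos hz, if_pos hz]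
    exact ⟨cell_eq g2 hg2.1 hg2.2 r c hr hc9, cellA_shape g2 r c hg2 hr⟩
  · rw [if_neg hz, if_neg hz]
    exact ⟨rfl, hg2⟩
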